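-- pv_equiv track=rewrite | github.com/Aico-Systems/docs | reference/PlanSo/tool.py | _extract_set_cookie_expiries
-- ===== SOURCE A (Python) =====
-- from typing import Any, Dict, Iterable, List, Optional, Tuple
--
-- def _extract_set_cookie_expiries(set_cookie_headers: Iterable[str]) -> List[Tuple[str, Optional[str], Optional[int]]]:
--     """
--     Best-effort parsing of Set-Cookie expiry information.
--     Returns list of (cookie_name, expires_str, max_age_seconds).
--     """
--     out: List[Tuple[str, Optional[str], Optional[int]]] = []
--     for sc in set_cookie_headers:
--         parts = [p.strip() for p in sc.split(";")]
--         if not parts: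
--             continue
--         name_val = parts[0]
--         if "=" not in name_val:
--             continue
--         name = name_val.split("=", 1)[0]
--         expires = None
--         max_age = None
--         for p in parts[1:]:
--             if p.lower().startswith("expires="):
--                 expires = p.split("=", 1)[1].strip()
--             elif p.lower().startswith("max-age="):
--                 try:
--                     max_age = int(p.split("=", 1)[1].strip())
--                 except Exception:
--                     max_age = None
--         out.append((name, expires, max_age))
--     return out
-- ===== SOURCE B (Python) =====
-- from typing import Iterable, List, Optional, Tuple
--
-- def _extract_set_cookie_expiries(set_cookie_headers: Iterable[str]) -> List[Tuple[str, Optional[str], Optional[int]]]: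
--     """
--     Best-effort parsing of Set-Cookie expiry information.
--     Returns list of (cookie_name, expires_str, max_age_seconds).
--     """
--     def parse_one(sc):
--         parts = [p.strip() for p in sc.split(";")]
--         if "=" not in parts[0]:
--             return None
--         name = parts[0].split("=", 1)[0]
--         attrs = parts[1:]
--         expires = next((p.split("=", 1)[1].strip()
--                         for p in reversed(attrs)
--                         if p.lower().startswith("expires=")), None)
--         raw = next((p.split("=", 1)[1].strip()
--                     for p in reversed(attrs)
--                     if p.lower().startswith("max-age=")), None)
--         if raw is None:
--             max_age = None
--         else:
--             try:
--                 max_age = int(raw)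
--             except Exception:
--                 max_age = None
--         return (name, expires, max_age)
--
--     return [t for t in map(parse_one, set_cookie_headers) if t is not None]
-- ===== Notes on version B (the rewrite author's own statement) =====
-- stated objective: alternative
-- what changed: B parses each header independently with a parse_one helper mapped and filtered over the input, and finds the effective (last-wins) expires/max-age attribute by taking the first match while scanning the attribute parts in reverse, instead of A's stateful accumulator loop over a growing output list.
import Mathlib
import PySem

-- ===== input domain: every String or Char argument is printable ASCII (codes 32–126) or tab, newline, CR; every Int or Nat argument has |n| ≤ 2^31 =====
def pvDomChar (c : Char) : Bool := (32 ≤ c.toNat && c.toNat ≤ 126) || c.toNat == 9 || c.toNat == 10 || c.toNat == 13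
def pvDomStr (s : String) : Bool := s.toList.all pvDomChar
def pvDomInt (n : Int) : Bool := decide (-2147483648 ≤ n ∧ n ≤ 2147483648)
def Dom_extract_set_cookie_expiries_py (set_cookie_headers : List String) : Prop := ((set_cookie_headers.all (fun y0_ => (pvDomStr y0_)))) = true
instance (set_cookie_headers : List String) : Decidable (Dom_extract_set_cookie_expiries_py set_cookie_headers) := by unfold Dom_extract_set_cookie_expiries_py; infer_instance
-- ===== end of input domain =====

-- B parses each header independently (map + filter) and finds the last-wins attribute by a
-- reversed scan, instead of A's stateful accumulator loop (alternative decomposition).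

-- ===== PORT A =====
-- A's p.split("=", 1)
def pySplit1 (s : String) : List String := (PySem.Str.splitMax? s "=" 1).getD []

-- body of A's inner 'for p in parts[1:]' loop, state = (expires, max_age)
def pvA_inner (st : Option String × Option Int) (p : String) : Option String × Option Int :=
  if PySem.Str.startswith (PySem.Str.lower p) "expires=" then
    (some (PySem.Str.strip ((pySplit1 p).getD 1 "")), st.2)
  else if PySem.Str.startswith (PySem.Str.lower p) "max-age=" then
    (st.1, PySem.Int.ofStr? (PySem.Str.strip ((pySplit1 p).getD 1 "")))
  else st

-- body of A's outer 'for sc in set_cookie_headers' loop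
def pvA_item (out : List (String × Option String × Option Int)) (sc : String) :
    List (String × Option String × Option Int) :=
  let parts := ((PySem.Str.split? sc ";").getD []).map PySem.Str.strip
  match parts with
  | [] => out                                     -- 'if not parts: continue'
  | name_val :: rest =>
    if PySem.Str.isIn "=" name_val then
      let name := (pySplit1 name_val).headD ""
      let st := rest.foldl pvA_inner (none, none)
      out ++ [(name, st.1, st.2)]
    else out                                      -- 'if "=" not in name_val: continue'

def extract_set_cookie_expiries_py (set_cookie_headers : List String) :
    List (String × Option String × Option Int) :=
  set_cookie_headers.foldl pvA_item []

-- ===== PORT B =====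
-- B's generator predicates and extracted value
def pvB_isExp (p : String) : Bool := PySem.Str.startswith (PySem.Str.lower p) "expires="
def pvB_isMax (p : String) : Bool := PySem.Str.startswith (PySem.Str.lower p) "max-age="
def pvB_val (p : String) : String :=
  PySem.Str.strip (((PySem.Str.splitMax? p "=" 1).getD []).getD 1 "")

-- B's parse_one: returns none for a skipped header
def pvB_parse (sc : String) : Option (String × Option String × Option Int) :=
  let parts := ((PySem.Str.split? sc ";").getD []).map PySem.Str.strip
  if PySem.Str.isIn "=" (parts.headD "") then
    let name := ((PySem.Str.splitMax? (parts.headD "") "=" 1).getD []).headD ""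
    let attrs := parts.tail
    let expires := (attrs.reverse.find? pvB_isExp).map pvB_val
    let max_age :=
      match attrs.reverse.find? pvB_isMax with
      | some p => PySem.Int.ofStr? (pvB_val p)
      | none => none
    some (name, expires, max_age)
  else none

def extract_set_cookie_expiries_py_alt (set_cookie_headers : List String) :
    List (String × Option String × Option Int) :=
  set_cookie_headers.filterMap pvB_parse

-- ===== PRECONDITION & SPEC =====
def Spec_extract_set_cookie_expiries_py (set_cookie_headers : List String) (out : List (String × Option String × Option Int)) : Prop := out = extract_set_cookie_expiries_py_alt set_cookie_headers
instance (set_cookie_headers : List String) (out : List (String × Option String × Option Int)) : Decidable (Spec_extract_set_cookie_expiries_py set_cookie_headers out) := by unfold Spec_extract_set_cookie_expiries_py; infer_instance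

-- ===== CLAIM =====
def Claim_equal_extract_set_cookie_expiries_py : Prop := ∀ (set_cookie_headers : List String), Dom_extract_set_cookie_expiries_py set_cookie_headers → Spec_extract_set_cookie_expiries_py set_cookie_headers (extract_set_cookie_expiries_py set_cookie_headers)

-- ===== LEMMAS AND PROOFS =====

-- a part cannot start with both "expires=" and "max-age="
lemma pv_excl (p : String) : pvB_isExp p = true → pvB_isMax p = false := by
  intro h1
  by_contra h2
  simp only [Bool.not_eq_false] at h2
  simp only [pvB_isExp, pvB_isMax, PySem.Str.startswith, PySem.Chars.startswith] at h1 h2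
  rw [List.isPrefixOf_iff_prefix] at h1 h2
  obtain ⟨u, hu⟩ := h1
  obtain ⟨v, hv⟩ := h2
  rw [← hv] at hu
  rw [show ("max-age=" : String).toList = 'm' :: "ax-age=".toList from rfl,
      show ("expires=" : String).toList = 'e' :: "xpires=".toList from rfl] at hu
  simp at hu

lemma pvA1 (st : Option String × Option Int) (p : String) :
    (pvA_inner st p).1 = if pvB_isExp p then some (pvB_val p) else st.1 := by
  unfold pvA_inner pvB_isExp pvB_val pySplit1
  split_ifs with h1 h2 <;> simp_all

lemma pvA2 (st : Option String × Option Int) (p : String) :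
    (pvA_inner st p).2 = if pvB_isMax p then PySem.Int.ofStr? (pvB_val p) else st.2 := by
  unfold pvA_inner
  by_cases h1 : PySem.Str.startswith (PySem.Str.lower p) "expires=" = true
  · have hm := pv_excl p (by simpa [pvB_isExp] using h1)
    rw [if_pos h1]
    simp [hm]
  · by_cases h2 : PySem.Str.startswith (PySem.Str.lower p) "max-age=" = true
    · rw [if_neg h1, if_pos h2, if_pos (show pvB_isMax p = true from h2)]
      simp only [pvB_val, pySplit1]
    · rw [if_neg h1, if_neg h2, if_neg (show ¬ pvB_isMax p = true from h2)]

lemma pv_fold (l : List String) : ∀ st : Option String × Option Int,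
    l.foldl pvA_inner st =
      ((match l.reverse.find? pvB_isExp with
        | some p => some (pvB_val p)
        | none => st.1),
       (match l.reverse.find? pvB_isMax with
        | some p => PySem.Int.ofStr? (pvB_val p)
        | none => st.2)) := by
  induction l with
  | nil => intro st; simp
  | cons p t ih =>
    intro st
    rw [List.foldl_cons, ih]
    simp only [List.reverse_cons, List.find?_append]
    cases hE : t.reverse.find? pvB_isExp <;> cases hM : t.reverse.find? pvB_isMax <;>
      simp [List.find?, pvA1, pvA2, Option.or] <;>
      cases hp : pvB_isExp p <;> cases hq : pvB_isMax p <;> simp_all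

lemma pv_item (out : List (String × Option String × Option Int)) (sc : String) :
    pvA_item out sc = out ++ (pvB_parse sc).toList := by
  unfold pvA_item pvB_parse
  cases h : ((PySem.Str.split? sc ";").getD []).map PySem.Str.strip with
  | nil =>
    simp
    decide
  | cons nv rest =>
    simp only [List.headD_cons, List.tail_cons]
    by_cases hg : PySem.Str.isIn "=" nv = true
    · simp only [hg, if_pos, pv_fold, pySplit1]
      cases hE : rest.reverse.find? pvB_isExp <;> cases hM : rest.reverse.find? pvB_isMax <;>
        simp [Option.toList]
    · simp [PySem.Str.isIn] at hg
      simp [hg]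

lemma pv_main (hs : List String) : ∀ out, hs.foldl pvA_item out = out ++ hs.filterMap pvB_parse := by
  induction hs with
  | nil => intro out; simp
  | cons sc t ih =>
    intro out
    rw [List.foldl_cons, pv_item, ih, List.filterMap_cons]
    cases pvB_parse sc <;> simp

-- ===== VERDICT =====
theorem extract_set_cookie_expiries_py_spec : Claim_equal_extract_set_cookie_expiries_py := by
  intro hs _
  unfold Spec_extract_set_cookie_expiries_py extract_set_cookie_expiries_py extract_set_cookie_expiries_py_alt
  simpa using pv_main hs []
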